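-- pv_equiv track=rewrite | github.com/Thopterek/ChessBenchmark | week02/Nate/fen_note.py | fen_to_detailed_description
-- ===== SOURCE A (Python) =====
-- def fen_to_detailed_description(fen):
--     """
--     Generate a more detailed description similar to the example
--     """
--     # Define piece names
--     piece_names = {
--         'r': 'black rook',
--         'n': 'black horse',
--         'b': 'black bishop',
--         'q': 'black queen',
--         'k': 'black king',
--         'p': 'black pawn',
--         'R': 'white rook',
--         'N': 'white horse',
--         'B': 'white bishop',
--         'Q': 'white queen',
--         'K': 'white king',
--         'P': 'white pawn'
--     }
--
--     files = ['a', 'b', 'c', 'd', 'e', 'f', 'g', 'h']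
--
--     # Parse FEN
--     fen_parts = fen.split(' ')
--     board_fen = fen_parts[0]
--
--     # Group pieces by rank for more natural description
--     pieces_by_rank = {8: [], 7: [], 6: [], 5: [], 4: [], 3: [], 2: [], 1: []}
--
--     rank = 8
--     for row in board_fen.split('/'):
--         file_index = 0
--         for char in row:
--             if char.isdigit():
--                 file_index += int(char)
--             else:
--                 piece_name = piece_names[char]
--                 square = f"{files[file_index]}{rank}"
--                 pieces_by_rank[rank].append((piece_name, square))
--                 file_index += 1
--         rank -= 1
--
--     # Generate description
--     description_lines = []
--
--     for rank in sorted(pieces_by_rank.keys(), reverse=True):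
--         pieces = pieces_by_rank[rank]
--         if pieces:
--             # Group pieces by type for this rank
--             pieces_dict = {}
--             for piece_name, square in pieces:
--                 if piece_name not in pieces_dict:
--                     pieces_dict[piece_name] = []
--                 pieces_dict[piece_name].append(square)
--
--             rank_description = []
--             for piece_name, squares in pieces_dict.items():
--                 if len(squares) == 1:
--                     rank_description.append(f"{piece_name} is at {squares[0]}")
--                 else:
--                     squares_str = ", ".join(squares[:-1]) + f" and {squares[-1]}"
--                     rank_description.append(f"{piece_name}s are at {squares_str}")
--
--             if rank_description:
--                 description_lines.append(" ".join(rank_description) + ".")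
--
--     return "\n".join(description_lines)
-- ===== SOURCE B (Python) =====
-- def fen_to_detailed_description(fen):
--     """
--     Streaming rewrite: one pass over the board rows with rank counting down
--     from 8; pieces are grouped per row directly into an ordered dict, and each
--     row's line is emitted immediately -- no pieces_by_rank dict, no sorted().
--     """
--     piece_names = {
--         'r': 'black rook', 'n': 'black horse', 'b': 'black bishop',
--         'q': 'black queen', 'k': 'black king', 'p': 'black pawn',
--         'R': 'white rook', 'N': 'white horse', 'B': 'white bishop',
--         'Q': 'white queen', 'K': 'white king', 'P': 'white pawn',
--     }
--     files = "abcdefgh"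
--     lines = []
--     rank = 8
--     for row in fen.split(' ')[0].split('/'):
--         groups = {}
--         file_index = 0
--         for ch in row:
--             if ch.isdigit():
--                 file_index += int(ch)
--             else:
--                 name = piece_names[ch]
--                 groups.setdefault(name, []).append(f"{files[file_index]}{rank}")
--                 file_index += 1
--         parts = []
--         for name, squares in groups.items():
--             if len(squares) == 1:
--                 parts.append(f"{name} is at {squares[0]}")
--             else:
--                 parts.append(f"{name}s are at {', '.join(squares[:-1])} and {squares[-1]}")
--         if parts:
--             lines.append(" ".join(parts) + ".")
--         rank -= 1
--     return "\n".join(lines)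
-- ===== Notes on version B (the rewrite author's own statement) =====
-- stated objective: simpler
-- what changed: Replaces A's two-phase pipeline (collect pieces into a fixed dict keyed 8..1, then a sorted(keys, reverse=True) pass that regroups each rank's list into a second dict) with a single streaming pass over board rows that decrements rank from 8, groups each row's pieces directly into one ordered dict via setdefault, and emits that row's line immediately.
import Mathlib
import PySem

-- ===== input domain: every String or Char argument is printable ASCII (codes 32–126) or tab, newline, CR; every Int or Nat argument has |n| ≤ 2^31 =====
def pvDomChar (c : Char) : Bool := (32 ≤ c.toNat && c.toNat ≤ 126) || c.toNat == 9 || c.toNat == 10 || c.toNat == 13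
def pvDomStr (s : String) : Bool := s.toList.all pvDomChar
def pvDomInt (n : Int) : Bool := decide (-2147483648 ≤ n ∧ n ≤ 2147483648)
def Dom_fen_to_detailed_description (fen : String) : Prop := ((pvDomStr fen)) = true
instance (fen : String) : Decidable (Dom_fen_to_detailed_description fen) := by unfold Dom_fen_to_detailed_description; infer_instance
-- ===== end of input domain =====

-- B replaces A's two-phase collect-into-fixed-dict-then-sorted-scan with a single
-- streaming pass that groups and formats each row immediately (objective: simpler).

-- ===== PORT A =====
def pieceNamesA : PySem.Dict Char String := PySem.Dict.ofList
  [('r', "black rook"), ('n', "black horse"), ('b', "black bishop"),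
   ('q', "black queen"), ('k', "black king"), ('p', "black pawn"),
   ('R', "white rook"), ('N', "white horse"), ('B', "white bishop"),
   ('Q', "white queen"), ('K', "white king"), ('P', "white pawn")]

def filesA : List String := ["a", "b", "c", "d", "e", "f", "g", "h"]

def initRanksA : PySem.Dict Int (List (String × String)) := PySem.Dict.ofList
  [(8, []), (7, []), (6, []), (5, []), (4, []), (3, []), (2, []), (1, [])]

-- inner 'for char in row' loop; state = (file_index, pieces_by_rank)
def charStepA (r : Int) (st : Int × PySem.Dict Int (List (String × String))) (c : Char) :
    Int × PySem.Dict Int (List (String × String)) :=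
  if PySem.Chars.isdigit c then
    (st.1 + (PySem.Int.ofChars? [c]).getD 0, st.2)
  else
    -- .getD: none = KeyError / IndexError / missing rank key, all excluded by Pre_
    let name := (PySem.Dict.get? pieceNamesA c).getD ""
    let sq := (PySem.List.pyGet? filesA st.1).getD "" ++ PySem.Int.toStr r
    (st.1 + 1, PySem.Dict.modify st.2 r [] (fun l => l ++ [(name, sq)]))

-- outer 'for row in board_fen.split('/')' loop; state = (rank, pieces_by_rank)
def rowStepA (st : Int × PySem.Dict Int (List (String × String))) (row : String) :
    Int × PySem.Dict Int (List (String × String)) :=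
  ((st.1 - 1), (row.toList.foldl (charStepA st.1) (0, st.2)).2)

-- 'if piece_name not in pieces_dict: pieces_dict[piece_name] = []; pieces_dict[piece_name].append(square)'
def groupStepA (pd : PySem.Dict String (List String)) (p : String × String) :
    PySem.Dict String (List String) :=
  let pd' := if (PySem.Dict.get? pd p.1).isNone then PySem.Dict.insert pd p.1 [] else pd
  PySem.Dict.modify pd' p.1 [] (fun l => l ++ [p.2])

def descItemA (it : String × List String) : String :=
  if it.2.length == 1 then
    it.1 ++ " is at " ++ (PySem.List.pyGet? it.2 0).getD ""
  else
    it.1 ++ "s are at " ++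
      (PySem.Str.join ", " (PySem.List.slice it.2 none (some (-1))) ++
        (" and " ++ (PySem.List.pyGet? it.2 (-1)).getD ""))

-- the 'for rank in sorted(pieces_by_rank.keys(), reverse=True)' description loop
def rankLinesA (d : PySem.Dict Int (List (String × String))) : List String :=
  (PySem.List.sorted d.keys (fun k => k) true).foldl (fun lines r =>
    let pieces := PySem.Dict.getD d r []
    if pieces ≠ [] then
      let pd := pieces.foldl groupStepA PySem.Dict.empty
      let rd := pd.items.foldl (fun rd it => rd ++ [descItemA it]) []
      if rd ≠ [] then lines ++ [PySem.Str.join " " rd ++ "."] else lines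
    else lines) []

def fen_to_detailed_description (fen : String) : String :=
  let fen_parts := (PySem.Str.split? fen " ").getD []
  let board := (PySem.List.pyGet? fen_parts 0).getD ""
  let d := (((PySem.Str.split? board "/").getD []).foldl rowStepA (8, initRanksA)).2
  PySem.Str.join "\n" (rankLinesA d)

-- ===== PORT B =====
def pieceNamesB : PySem.Dict Char String := PySem.Dict.ofList
  [('r', "black rook"), ('n', "black horse"), ('b', "black bishop"),
   ('q', "black queen"), ('k', "black king"), ('p', "black pawn"),
   ('R', "white rook"), ('N', "white horse"), ('B', "white bishop"),
   ('Q', "white queen"), ('K', "white king"), ('P', "white pawn")]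

def filesB : String := "abcdefgh"

-- inner 'for ch in row' loop; state = (file_index, groups)
def charStepB (r : Int) (st : Int × PySem.Dict String (List String)) (c : Char) :
    Int × PySem.Dict String (List String) :=
  if PySem.Chars.isdigit c then
    (st.1 + (PySem.Int.ofChars? [c]).getD 0, st.2)
  else
    -- .getD / none-branch: KeyError / IndexError, excluded by Pre_
    let name := (PySem.Dict.get? pieceNamesB c).getD ""
    let sq := (match PySem.Str.pyGet? filesB st.1 with
               | some ch => String.ofList [ch]
               | none => "") ++ PySem.Int.toStr r
    (st.1 + 1, PySem.Dict.modify st.2 name [] (fun l => l ++ [sq]))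

def descItemB (it : String × List String) : String :=
  if it.2.length == 1 then
    it.1 ++ " is at " ++ (PySem.List.pyGet? it.2 0).getD ""
  else
    it.1 ++ "s are at " ++
      (PySem.Str.join ", " (PySem.List.slice it.2 none (some (-1))) ++
        (" and " ++ (PySem.List.pyGet? it.2 (-1)).getD ""))

-- one row: group directly, format immediately; state = (rank, lines)
def rowStepB (st : Int × List String) (row : String) : Int × List String :=
  let groups := (row.toList.foldl (charStepB st.1) (0, PySem.Dict.empty)).2
  let parts := groups.items.foldl (fun ps it => ps ++ [descItemB it]) []
  (st.1 - 1, if parts ≠ [] then st.2 ++ [PySem.Str.join " " parts ++ "."] else st.2)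

def fen_to_detailed_description_alt (fen : String) : String :=
  let board := (PySem.List.pyGet? ((PySem.Str.split? fen " ").getD []) 0).getD ""
  let rows := (PySem.Str.split? board "/").getD []
  PySem.Str.join "\n" ((rows.foldl rowStepB (8, [])).2)

-- ===== PRECONDITION & SPEC =====
-- bounds/shape check only (it computes no output): every char of a board row must be a
-- digit or a known piece letter whose file index is still ≤ 7 (else KeyError/IndexError)
def rowCheck (fi : Int) : List Char → Bool
  | [] => true
  | c :: cs =>
    if PySem.Chars.isdigit c then rowCheck (fi + (PySem.Int.ofChars? [c]).getD 0) cs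
    else decide (c ∈ ['r','n','b','q','k','p','R','N','B','Q','K','P']) &&
         (decide (fi ≤ 7) && rowCheck (fi + 1) cs)

-- Pre_ = exactly the inputs where A returns: each of the first 8 board rows passes the
-- bounds check, and any row past the 8th is all digits (a piece there is a KeyError,
-- since pieces_by_rank only has keys 8..1)
def Pre_fen_to_detailed_description (fen : String) : Prop :=
  let rows := (PySem.Str.split? ((PySem.List.pyGet? ((PySem.Str.split? fen " ").getD []) 0).getD "") "/").getD []
  ((rows.take 8).all (fun row => rowCheck 0 row.toList)) = true ∧
  ((rows.drop 8).all (fun row => row.toList.all PySem.Chars.isdigit)) = true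

instance (fen : String) : Decidable (Pre_fen_to_detailed_description fen) := by
  unfold Pre_fen_to_detailed_description; infer_instance

def pvWitness_fen_to_detailed_description : String :=
  "rnbqkbnr/pppppppp/8/8/8/8/PPPPPPPP/RNBQKBNR w KQkq - 0 1"

def Spec_fen_to_detailed_description (fen : String) (out : String) : Prop := out = fen_to_detailed_description_alt fen
instance (fen : String) (out : String) : Decidable (Spec_fen_to_detailed_description fen out) := by unfold Spec_fen_to_detailed_description; infer_instance

-- ===== CLAIM (what is proved, stated in full; the proofs are below) =====
def Claim_equal_fen_to_detailed_description : Prop := ∀ (fen : String), Dom_fen_to_detailed_description fen → Pre_fen_to_detailed_description fen → Spec_fen_to_detailed_description fen (fen_to_detailed_description fen)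

-- ===== LEMMAS AND PROOFS =====

-- proof-side vocabulary
def digitVal (c : Char) : Int := (PySem.Int.ofChars? [c]).getD 0
def pieceName (c : Char) : String := (PySem.Dict.get? pieceNamesA c).getD ""
def sqA (fi r : Int) : String := (PySem.List.pyGet? filesA fi).getD "" ++ PySem.Int.toStr r

-- the (name, square) pairs a row contributes, in file order
def rowPiecesFrom (fi r : Int) : List Char → List (String × String)
  | [] => []
  | c :: cs =>
    if PySem.Chars.isdigit c then rowPiecesFrom (fi + digitVal c) r cs
    else (pieceName c, sqA fi r) :: rowPiecesFrom (fi + 1) r cs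

-- what rank `tgt` collects while ranks r0, r0-1, … are assigned to the rows
def contrib (r0 tgt : Int) : List String → List (String × String)
  | [] => []
  | row :: rest =>
    (if r0 = tgt then rowPiecesFrom 0 tgt row.toList else []) ++ contrib (r0 - 1) tgt rest

def groupFold (ps : List (String × String)) : PySem.Dict String (List String) :=
  ps.foldl (fun g p => PySem.Dict.modify g p.1 [] (fun l => l ++ [p.2])) PySem.Dict.empty

-- the (0 or 1) description lines a rank's piece list yields
def lineOpt (ps : List (String × String)) : List String :=
  let parts := (groupFold ps).items.foldl (fun acc it => acc ++ [descItemB it]) []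
  if parts ≠ [] then [PySem.Str.join " " parts ++ "."] else []

-- B's emitted lines, rows paired with ranks r0, r0-1, …
def linesB (r0 : Int) : List String → List String
  | [] => []
  | row :: rest => lineOpt (rowPiecesFrom 0 r0 row.toList) ++ linesB (r0 - 1) rest

-- the rank list [r0, r0-1, …, 1]
def ranksToN : Nat → Int → List Int
  | 0, _ => []
  | n + 1, r => r :: ranksToN n (r - 1)

def ranksTo (r0 : Int) : List Int := ranksToN r0.toNat r0


-- small facts

lemma pyIdx8 (fi : Int) (k : Nat) (h : PySem.List.pyIdx? 8 fi = some k) : k < 8 := by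
  unfold PySem.List.pyIdx? at h
  split_ifs at h <;> simp_all <;> omega

lemma filesB_toList : filesB.toList = ['a','b','c','d','e','f','g','h'] := rfl

-- on every fi the two square expressions agree (same length 8 on both sides)
lemma sq_eq (fi r : Int) :
    (match PySem.Str.pyGet? filesB fi with
     | some ch => String.ofList [ch] | none => "") ++ PySem.Int.toStr r = sqA fi r := by
  have hB : PySem.Str.pyGet? filesB fi
      = (PySem.List.pyIdx? 8 fi).bind (fun k => ['a','b','c','d','e','f','g','h'][k]?) := by
    simp [PySem.Str.pyGet?, PySem.Chars.pyGet?_eq_listPyGet?, PySem.List.pyGet?, filesB_toList]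
  have hA : PySem.List.pyGet? filesA fi = (PySem.List.pyIdx? 8 fi).bind (fun k => filesA[k]?) := by
    simp [PySem.List.pyGet?, filesA]
  unfold sqA
  rw [hA, hB]
  rcases hk : PySem.List.pyIdx? 8 fi with _ | k
  · rfl
  · have := pyIdx8 fi k hk
    simp only [Option.bind_some]
    interval_cases k <;> rfl

lemma descItem_eq : descItemA = descItemB := rfl

lemma rowPiecesFrom_digits (r : Int) :
    ∀ (cs : List Char) (fi : Int), (cs.all PySem.Chars.isdigit) = true →
      rowPiecesFrom fi r cs = []
  | [], _, _ => rfl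
  | c :: cs, fi, h => by
    simp only [List.all_cons, Bool.and_eq_true] at h
    simp only [rowPiecesFrom, h.1, if_true]
    exact rowPiecesFrom_digits r cs _ h.2

lemma lineOpt_nil : lineOpt [] = [] := rfl

-- B inner loop = group-fold over the row's piece list
lemma B1 (r : Int) (cs : List Char) :
    ∀ (fi : Int) (g : PySem.Dict String (List String)),
      (cs.foldl (charStepB r) (fi, g)).2 =
      (rowPiecesFrom fi r cs).foldl
        (fun g p => PySem.Dict.modify g p.1 [] (fun l => l ++ [p.2])) g := by
  induction cs with
  | nil => intro fi g; rfl
  | cons c cs ih =>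
    intro fi g
    by_cases hd : PySem.Chars.isdigit c
    · simp only [List.foldl_cons, charStepB, hd, if_true, rowPiecesFrom, digitVal]
      exact ih _ g
    · simp only [List.foldl_cons, charStepB, hd, if_false, Bool.false_eq_true, rowPiecesFrom]
      rw [ih]
      have hsq := sq_eq fi r
      have hd' : PySem.Dict.modify g ((PySem.Dict.get? pieceNamesB c).getD "")
            [] (fun l => l ++ [(match PySem.Str.pyGet? filesB fi with
                | some ch => String.ofList [ch] | none => "") ++ PySem.Int.toStr r])
          = PySem.Dict.modify g (pieceName c) [] (fun l => l ++ [sqA fi r]) := by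
        simp only [hsq]; rfl
      rw [hd']

-- A inner loop leaves the dict alone on an all-digit row
lemma A1 (r : Int) (cs : List Char) :
    ∀ (fi : Int) (d : PySem.Dict Int (List (String × String))),
      (cs.all PySem.Chars.isdigit) = true →
      (cs.foldl (charStepA r) (fi, d)).2 = d := by
  induction cs with
  | nil => intro fi d _; rfl
  | cons c cs ih =>
    intro fi d h
    simp only [List.all_cons, Bool.and_eq_true] at h
    simp only [List.foldl_cons, charStepA, h.1, if_true]
    exact ih _ d h.2

-- A inner loop: keys preserved, target rank extended with the row's pieces
lemma A2 (r : Int) (cs : List Char) :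
    ∀ (fi : Int) (d : PySem.Dict Int (List (String × String))),
      d.contains r = true →
      ((cs.foldl (charStepA r) (fi, d)).2).keys = d.keys ∧
      ∀ r', ((cs.foldl (charStepA r) (fi, d)).2).getD r' [] =
        d.getD r' [] ++ (if r' = r then rowPiecesFrom fi r cs else []) := by
  induction cs with
  | nil =>
    intro fi d _
    refine ⟨rfl, fun r' => ?_⟩
    simp [rowPiecesFrom]
  | cons c cs ih =>
    intro fi d hc
    by_cases hd : PySem.Chars.isdigit c
    · simp only [List.foldl_cons, charStepA, hd, if_true]
      rcases ih _ d hc with ⟨h1, h2⟩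
      refine ⟨h1, fun r' => ?_⟩
      rw [h2 r']
      simp only [rowPiecesFrom, hd, if_true, digitVal]
    · simp only [List.foldl_cons, charStepA, hd, if_false, Bool.false_eq_true]
      set p : String × String :=
        ((PySem.Dict.get? pieceNamesA c).getD "",
          (PySem.List.pyGet? filesA fi).getD "" ++ PySem.Int.toStr r) with hp
      have hc' : (PySem.Dict.modify d r [] (fun l => l ++ [p])).contains r = true := by
        rw [PySem.Dict.contains_modify]; simp
      rcases ih _ _ hc' with ⟨h1, h2⟩
      constructor
      · rw [h1, PySem.Dict.keys_modify, PySem.Dict.keys_insert_of_contains _ _ hc]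
      · intro r'
        rw [h2 r', PySem.Dict.getD_modify]
        by_cases hr : r' = r
        · subst hr
          simp only [if_true, rowPiecesFrom, hd, if_false, Bool.false_eq_true]
          rw [List.append_assoc]
          rfl
        · simp [hr]

-- what rank tgt collects from later (lower-ranked) rows: nothing if tgt is above r0
lemma contrib_gt (tgt : Int) (rows : List String) :
    ∀ (r0 : Int), r0 < tgt → contrib r0 tgt rows = [] := by
  induction rows with
  | nil => intro r0 _; rfl
  | cons row rest ih =>
    intro r0 h
    simp only [contrib]
    rw [if_neg (by omega), ih (r0 - 1) (by omega)]
    rfl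

-- A's row fold: keys preserved and every rank ends with its contribution,
-- provided rows below rank 1 are all digits and the dict has keys 8..1
lemma A3 (rows : List String) :
    ∀ (r0 : Int) (d : PySem.Dict Int (List (String × String))),
      r0 ≤ 8 →
      d.keys = ([8, 7, 6, 5, 4, 3, 2, 1] : List Int) →
      (∀ (i : Nat) (h : i < rows.length), r0 - i < 1 →
        (rows[i].toList.all PySem.Chars.isdigit) = true) →
      ((rows.foldl rowStepA (r0, d)).2).keys = d.keys ∧
      ∀ r', ((rows.foldl rowStepA (r0, d)).2).getD r' [] =
        d.getD r' [] ++ contrib r0 r' rows := by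
  induction rows with
  | nil =>
    intro r0 d _ _ _
    exact ⟨rfl, fun r' => by simp [contrib]⟩
  | cons row rest ih =>
    intro r0 d h8 hk hdig
    simp only [List.foldl_cons, rowStepA]
    by_cases hrow : (row.toList.all PySem.Chars.isdigit) = true
    · rw [A1 r0 row.toList 0 d hrow]
      have hdig' : ∀ (i : Nat) (h : i < rest.length), (r0 - 1) - i < 1 →
          (rest[i].toList.all PySem.Chars.isdigit) = true := by
        intro i h hi
        have := hdig (i + 1) (by simpa using Nat.succ_lt_succ h) (by push_cast; omega)
        simpa using this
      rcases ih (r0 - 1) d (by omega) hk hdig' with ⟨h1, h2⟩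
      refine ⟨h1, fun r' => ?_⟩
      rw [h2 r']
      simp only [contrib, rowPiecesFrom_digits r' row.toList 0 hrow]
      simp
    · have hr0 : 1 ≤ r0 := by
        by_contra hlt
        exact hrow (hdig 0 (by simp) (by push_cast; omega))
      have hcont : d.contains r0 = true := by
        rw [PySem.Dict.contains_iff_mem_keys, hk]
        simp only [List.mem_cons, List.not_mem_nil, or_false]
        omega
      rcases A2 r0 row.toList 0 d hcont with ⟨g1, g2⟩
      set d1 := ((row.toList.foldl (charStepA r0) (0, d)).2) with hd1
      have hdig' : ∀ (i : Nat) (h : i < rest.length), (r0 - 1) - i < 1 →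
          (rest[i].toList.all PySem.Chars.isdigit) = true := by
        intro i h hi
        have := hdig (i + 1) (by simpa using Nat.succ_lt_succ h) (by push_cast; omega)
        simpa using this
      rcases ih (r0 - 1) d1 (by omega) (by rw [g1, hk]) hdig' with ⟨h1, h2⟩
      refine ⟨by rw [h1, g1], fun r' => ?_⟩
      rw [h2 r', g2 r']
      simp only [contrib]
      by_cases hr : r' = r0
      · subst hr; simp [List.append_assoc]
      · rw [if_neg hr, if_neg (fun h => hr h.symm)]
        simp

-- A's per-piece grouping step is a plain modify
lemma groupStepA_eq (pd : PySem.Dict String (List String)) (p : String × String) :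
    groupStepA pd p = PySem.Dict.modify pd p.1 [] (fun l => l ++ [p.2]) := by
  unfold groupStepA PySem.Dict.modify
  rcases hg : PySem.Dict.get? pd p.1 with _ | v
  · simp only [Option.isNone_none, if_true]
    rw [PySem.Dict.getD_insert_self, PySem.Dict.insert_insert_self]
    rw [PySem.Dict.getD_of_get?_eq_none pd [] hg]
  · simp

-- A's per-rank description body = lineOpt of that rank's piece list
lemma A4 (pieces : List (String × String)) (lines : List String) :
    (if pieces ≠ [] then
      let pd := pieces.foldl groupStepA PySem.Dict.empty
      let rd := pd.items.foldl (fun rd it => rd ++ [descItemA it]) []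
      if rd ≠ [] then lines ++ [PySem.Str.join " " rd ++ "."] else lines
    else lines) = lines ++ lineOpt pieces := by
  have hpd : pieces.foldl groupStepA PySem.Dict.empty = groupFold pieces := by
    unfold groupFold
    exact PySem.List.foldl_congr_mem _ _ _ _ (fun acc x _ => groupStepA_eq acc x)
  by_cases hp : pieces = []
  · subst hp; simp [lineOpt_nil]
  · simp only [hp, ne_eq, not_false_iff, if_true, hpd]
    unfold lineOpt
    simp only [descItem_eq]
    by_cases h : (groupFold pieces).items.foldl (fun acc it => acc ++ [descItemB it]) [] = []
    · simp [h]
    · simp only [ne_eq, h, not_false_eq_true, if_true]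

-- B's row fold appends linesB
lemma B2 (rows : List String) :
    ∀ (r0 : Int) (lines : List String),
      (rows.foldl rowStepB (r0, lines)).2 = lines ++ linesB r0 rows := by
  induction rows with
  | nil => intro r0 lines; simp [linesB]
  | cons row rest ih =>
    intro r0 lines
    simp only [List.foldl_cons, rowStepB, linesB]
    rw [B1 r0 row.toList 0 PySem.Dict.empty]
    rw [ih]
    unfold lineOpt groupFold
    by_cases h : (((rowPiecesFrom 0 r0 row.toList).foldl
        (fun g p => PySem.Dict.modify g p.1 [] (fun l => l ++ [p.2]))
        PySem.Dict.empty).items.foldl (fun ps it => ps ++ [descItemB it]) []) = []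
    · simp [h]
    · simp only [ne_eq, h, not_false_eq_true, if_true]
      rw [List.append_assoc]

-- rank list recursion
lemma ranksTo_nil (r0 : Int) (h : r0 ≤ 0) : ranksTo r0 = [] := by
  unfold ranksTo
  have h0 : r0.toNat = 0 := by omega
  rw [h0]
  rfl

lemma ranksTo_cons (r0 : Int) (h : 1 ≤ r0) : ranksTo r0 = r0 :: ranksTo (r0 - 1) := by
  unfold ranksTo
  have h1 : r0.toNat = (r0 - 1).toNat + 1 := by omega
  rw [h1]
  rfl

lemma mem_ranksToN (n : Nat) : ∀ (r0 r : Int), r ∈ ranksToN n r0 → r ≤ r0 ∧ r0 - n < r := by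
  induction n with
  | zero => intro r0 r h; simp [ranksToN] at h
  | succ n ih =>
    intro r0 r h
    rcases List.mem_cons.1 h with rfl | h
    · constructor <;> push_cast <;> omega
    · rcases ih (r0 - 1) r h with ⟨h1, h2⟩
      constructor <;> push_cast at * <;> omega

lemma mem_ranksTo (r0 r : Int) (h : r ∈ ranksTo r0) : 1 ≤ r ∧ r ≤ r0 := by
  unfold ranksTo at h
  rcases mem_ranksToN r0.toNat r0 r h with ⟨h1, h2⟩
  omega

-- the bridge: B's streamed lines = flatMap of per-rank contributions
lemma BR (rows : List String) :
    ∀ (r0 : Int),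
      (∀ (i : Nat) (h : i < rows.length), r0 - i < 1 →
        (rows[i].toList.all PySem.Chars.isdigit) = true) →
      linesB r0 rows = (ranksTo r0).flatMap (fun r => lineOpt (contrib r0 r rows)) := by
  induction rows with
  | nil =>
    intro r0 _
    simp only [linesB]
    rw [List.flatMap_congr (g := fun _ => []) (fun r _ => by simp [contrib, lineOpt_nil])]
    simp
  | cons row rest ih =>
    intro r0 hdig
    have hdig' : ∀ (i : Nat) (h : i < rest.length), (r0 - 1) - i < 1 →
        (rest[i].toList.all PySem.Chars.isdigit) = true := by
      intro i h hi
      have := hdig (i + 1) (by simpa using Nat.succ_lt_succ h) (by push_cast; omega)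
      simpa using this
    by_cases h0 : r0 ≤ 0
    · rw [ranksTo_nil r0 h0]
      simp only [linesB, List.flatMap_nil]
      have hrow := hdig 0 (by simp) (by push_cast; omega)
      rw [rowPiecesFrom_digits r0 row.toList 0 (by simpa using hrow), lineOpt_nil]
      rw [ih (r0 - 1) hdig', ranksTo_nil (r0 - 1) (by omega)]
      simp
    · rw [ranksTo_cons r0 (by omega)]
      simp only [linesB, List.flatMap_cons]
      congr 1
      · have hc : contrib r0 r0 (row :: rest) = rowPiecesFrom 0 r0 row.toList := by
          simp [contrib, contrib_gt r0 rest (r0 - 1) (by omega)]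
        rw [hc]
      · rw [ih (r0 - 1) hdig']
        apply List.flatMap_congr
        intro r hr
        rcases mem_ranksTo _ _ hr with ⟨hr1, hr2⟩
        have hne : ¬ (r0 = r) := by omega
        have hc : contrib r0 r (row :: rest) = contrib (r0 - 1) r rest := by
          simp [contrib, hne]
        rw [hc]

-- initial dict facts
lemma initRanksA_keys : initRanksA.keys = ([8, 7, 6, 5, 4, 3, 2, 1] : List Int) := by decide

lemma initRanksA_getD (r : Int) : initRanksA.getD r [] = [] := by
  have h : initRanksA = PySem.Dict.mk
      [(8, []), (7, []), (6, []), (5, []), (4, []), (3, []), (2, []), (1, [])] := by decide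
  rw [h, PySem.Dict.getD_eq_get?_getD]
  simp only [PySem.Dict.get?_mk_cons]
  split_ifs <;> rfl

lemma sorted_ranks : PySem.List.sorted ([8, 7, 6, 5, 4, 3, 2, 1] : List Int) (fun k => k) true
    = ([8, 7, 6, 5, 4, 3, 2, 1] : List Int) := by decide

lemma ranksTo_eight : ranksTo 8 = ([8, 7, 6, 5, 4, 3, 2, 1] : List Int) := by decide

-- both ports on the same row list
lemma core (rows : List String)
    (hdig' : ∀ row ∈ rows.drop 8, (row.toList.all PySem.Chars.isdigit) = true) :
    rankLinesA ((rows.foldl rowStepA (8, initRanksA)).2) = (rows.foldl rowStepB (8, [])).2 := by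
  have hdig : ∀ (i : Nat) (h : i < rows.length), (8 : Int) - i < 1 →
      (rows[i].toList.all PySem.Chars.isdigit) = true := by
    intro i hlen hi
    have h8 : 8 ≤ i := by omega
    refine hdig' rows[i] ?_
    rw [List.mem_iff_getElem]
    refine ⟨i - 8, by rw [List.length_drop]; omega, ?_⟩
    rw [List.getElem_drop]
    congr 1
    omega
  rcases A3 rows 8 initRanksA (by omega) initRanksA_keys hdig with ⟨h1, h2⟩
  unfold rankLinesA
  rw [h1, initRanksA_keys, sorted_ranks]
  have hstep : ∀ (lines : List String) (r : Int), r ∈ ([8, 7, 6, 5, 4, 3, 2, 1] : List Int) →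
      (let pieces := PySem.Dict.getD ((rows.foldl rowStepA (8, initRanksA)).2) r []
       if pieces ≠ [] then
         let pd := pieces.foldl groupStepA PySem.Dict.empty
         let rd := pd.items.foldl (fun rd it => rd ++ [descItemA it]) []
         if rd ≠ [] then lines ++ [PySem.Str.join " " rd ++ "."] else lines
       else lines) = lines ++ lineOpt (contrib 8 r rows) := by
    intro lines r _
    simp only []
    rw [A4, h2 r, initRanksA_getD, List.nil_append]
  rw [PySem.List.foldl_congr_mem _ _ (fun lines r => lines ++ lineOpt (contrib 8 r rows)) _
    (fun acc x hx => hstep acc x hx)]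
  rw [PySem.List.foldl_append_eq_flatMap]
  rw [B2 rows 8 [], BR rows 8 hdig, ranksTo_eight, List.nil_append]


-- ===== VERDICT (by name: the statement is the Claim_ definition above) =====
theorem fen_to_detailed_description_spec : Claim_equal_fen_to_detailed_description := by
  intro fen _ hpre
  unfold Pre_fen_to_detailed_description at hpre
  obtain ⟨-, hdrop⟩ := hpre
  unfold Spec_fen_to_detailed_description
  unfold fen_to_detailed_description fen_to_detailed_description_alt
  simp only []
  exact congrArg (PySem.Str.join "\n") (core _ (List.all_eq_true.1 hdrop))
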